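-- pv_equiv track=rewrite | github.com/dralletje/The-Guide-Intro-Programming-You-ve-Always-Wanted-But-Never-Had-Ik-ben-Rachid-Dinosaurier | intpart.py | intpartlim
-- ===== SOURCE A (Python) =====
-- def intpartlim(N, M, n):
-- 	if n < 0:
-- 		return 0
-- 	if n==0:
-- 		return 1
-- 	if M==1:
-- 		return 1 if n <= N else 0
-- 	if N==1:
-- 		return 1 if n <= M else 0
-- 	return intpartlim(N,M-1,n) + intpartlim(N-1,M,n-M)
-- ===== SOURCE B (Python) =====
-- def intpartlim(N, M, n):
--     if n < 0:
--         return 0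
--     if n == 0:
--         return 1
--     a = min(N, n)   # more than n parts can never be used
--     b = min(M, n)   # parts larger than n can never be used
--     if a <= 0 or b <= 0:
--         return 0
--     # rows[i][k] = number of partitions of k into at most i parts, each part <= j
--     rows = [[1] + [0] * n for _ in range(a + 1)]
--     for j in range(1, b + 1):
--         new_rows = [rows[0]]
--         for i in range(1, a + 1):
--             prev = new_rows[i - 1]   # at most i-1 parts, parts <= j
--             cur = rows[i]            # at most i parts, parts <= j-1
--             new_rows.append([cur[k] + (prev[k - j] if k >= j else 0) for k in range(n + 1)])
--         rows = new_rows
--     return rows[a][n]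
-- ===== Notes on version B (the rewrite author's own statement) =====
-- stated objective: faster
-- what changed: Replaced A's exponential naive recursion by a bottom-up dynamic-programming table over (parts-bound, part-size-bound, sum), with both bounds clamped to n since larger bounds cannot matter.
-- intended difference: For N <= 0 with n >= 2, M >= 2 and (M >= 3 or n even), A returns the number of partitions of n into parts of size 2..M (its N==1 guard is never reached when N starts non-positive), while B returns 0, the intended count of partitions into at most N <= 0 parts. — e.g. on intpartlim(0, 2, 2): A returns 1, B returns 0
import Mathlib
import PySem

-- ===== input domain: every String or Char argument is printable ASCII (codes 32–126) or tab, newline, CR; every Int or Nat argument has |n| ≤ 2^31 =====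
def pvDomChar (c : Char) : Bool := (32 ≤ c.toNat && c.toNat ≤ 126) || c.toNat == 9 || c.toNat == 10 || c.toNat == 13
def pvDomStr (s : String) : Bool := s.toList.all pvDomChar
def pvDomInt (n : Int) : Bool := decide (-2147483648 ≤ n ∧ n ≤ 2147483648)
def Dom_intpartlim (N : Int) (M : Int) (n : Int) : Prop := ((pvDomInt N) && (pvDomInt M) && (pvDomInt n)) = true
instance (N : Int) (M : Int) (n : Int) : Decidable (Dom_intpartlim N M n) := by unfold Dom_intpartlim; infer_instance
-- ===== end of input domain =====

-- B replaces A's exponential naive recursion by a bottom-up DP table over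
-- (parts-bound, part-size-bound, sum), both bounds clamped to n; B is faster
-- (a timing run measures it) and returns the intended 0 on the degenerate
-- inputs with N ≤ 0 described at D_intpartlim below.

-- ===== PORT A =====
-- A's recursion diverges when n ≥ 1, M ≤ 0 and N ≠ 1 (excluded by Pre_);
-- the fuel only makes the recursion total and is never exhausted on Pre_ inputs.
def intpartlimGo : Nat → Int → Int → Int → Int
  | 0, _, _, _ => 0
  | f+1, N, M, n =>
    if n < 0 then 0
    else if n = 0 then 1
    else if M = 1 then (if n ≤ N then 1 else 0)
    else if N = 1 then (if n ≤ M then 1 else 0)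
    else intpartlimGo f N (M-1) n + intpartlimGo f (N-1) M (n-M)

def intpartlim (N : Int) (M : Int) (n : Int) : Int :=
  intpartlimGo (M.toNat + n.toNat + 1) N M n

-- ===== PORT B =====
-- transliteration of Source B; all list indices are in range, so getD/pyGetD are exact
def intpartlim_alt (N : Int) (M : Int) (n : Int) : Int :=
  if n < 0 then 0
  else if n = 0 then 1
  else
    let a := min N n
    let b := min M n
    if a ≤ 0 ∨ b ≤ 0 then 0
    else
      let nn := n.toNat
      let rows0 : List (List Int) :=
        (List.range (a.toNat + 1)).map (fun _ => 1 :: List.replicate nn 0)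
      let rows :=
        (PySem.List.pyRange 1 (b+1) 1).foldl (fun rows j =>
          (PySem.List.pyRange 1 (a+1) 1).foldl (fun new_rows i =>
            let prevR := PySem.List.pyGetD new_rows (i-1) []
            let cur := PySem.List.pyGetD rows i []
            new_rows ++ [(List.range (nn+1)).map (fun k =>
              cur.getD k 0 + (if j ≤ (k : Int) then prevR.getD (k - j.toNat) 0 else 0))])
          [PySem.List.pyGetD rows 0 []]) rows0
      (rows.getD a.toNat []).getD nn 0

-- ===== PRECONDITION & SPEC =====
-- Pre_ excludes exactly the inputs where A's recursion never terminates
-- (Python raises RecursionError): n ≥ 1 with M ≤ 0 and N ≠ 1.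
def Pre_intpartlim (N : Int) (M : Int) (n : Int) : Prop :=
  n ≤ 0 ∨ 1 ≤ M ∨ N = 1
instance (N : Int) (M : Int) (n : Int) : Decidable (Pre_intpartlim N M n) := by
  unfold Pre_intpartlim; infer_instance
def pvWitness_intpartlim : Int × Int × Int := (2, 2, 2)

-- For N ≤ 0 with n ≥ 2, M ≥ 2 and (M ≥ 3 or n even), A returns the number of
-- partitions of n into parts of size 2..M (its N==1 guard is never reached when
-- N starts non-positive), while B returns 0, the intended count of partitions
-- into at most N ≤ 0 parts.
def D_intpartlim (N : Int) (M : Int) (n : Int) : Prop :=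
  N ≤ 0 ∧ 2 ≤ M ∧ 2 ≤ n ∧ (3 ≤ M ∨ n % 2 = 0)
instance (N : Int) (M : Int) (n : Int) : Decidable (D_intpartlim N M n) := by
  unfold D_intpartlim; infer_instance

def Spec_intpartlim (N : Int) (M : Int) (n : Int) (out : Int) : Prop :=
  ¬ D_intpartlim N M n → out = intpartlim_alt N M n
instance (N : Int) (M : Int) (n : Int) (out : Int) : Decidable (Spec_intpartlim N M n out) := by
  unfold Spec_intpartlim; infer_instance

def pvDiffWitness_intpartlim : Int × Int × Int := (0, 2, 2)
def pvDiffWitnessOut_intpartlim : Int × Int := (1, 0)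

-- ===== CLAIM (what is proved, stated in full; the proofs are below) =====
def Claim_unchanged_intpartlim : Prop := ∀ (N : Int) (M : Int) (n : Int), Dom_intpartlim N M n → Pre_intpartlim N M n → Spec_intpartlim N M n (intpartlim N M n)
def Claim_changed_intpartlim : Prop := Dom_intpartlim (pvDiffWitness_intpartlim.1) (pvDiffWitness_intpartlim.2.1) (pvDiffWitness_intpartlim.2.2) ∧ Pre_intpartlim (pvDiffWitness_intpartlim.1) (pvDiffWitness_intpartlim.2.1) (pvDiffWitness_intpartlim.2.2) ∧ D_intpartlim (pvDiffWitness_intpartlim.1) (pvDiffWitness_intpartlim.2.1) (pvDiffWitness_intpartlim.2.2) ∧ intpartlim (pvDiffWitness_intpartlim.1) (pvDiffWitness_intpartlim.2.1) (pvDiffWitness_intpartlim.2.2) = pvDiffWitnessOut_intpartlim.1 ∧ intpartlim_alt (pvDiffWitness_intpartlim.1) (pvDiffWitness_intpartlim.2.1) (pvDiffWitness_intpartlim.2.2) = pvDiffWitnessOut_intpartlim.2 ∧ pvDiffWitnessOut_intpartlim.1 ≠ pvDiffWitnessOut_intpartlim.2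
def Claim_exact_intpartlim : Prop := ∀ (N : Int) (M : Int) (n : Int), Dom_intpartlim N M n → Pre_intpartlim N M n → D_intpartlim N M n → intpartlim N M n ≠ intpartlim_alt N M n

-- ===== LEMMAS AND PROOFS =====

-- reference function: P i j k = number of partitions of k into at most i parts, each ≤ j
def Pcount : Nat → Nat → Nat → Nat
  | _, 0, k => if k = 0 then 1 else 0
  | 0, _+1, k => if k = 0 then 1 else 0
  | i+1, j+1, k => Pcount (i+1) j k + (if j+1 ≤ k then Pcount i (j+1) (k - (j+1)) else 0)
termination_by i j _ => (i, j)

theorem Pcount_zero_sum (i j : Nat) : Pcount i j 0 = 1 := by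
  induction j generalizing i with
  | zero => cases i <;> simp [Pcount]
  | succ j ih =>
    cases i with
    | zero => simp [Pcount]
    | succ i =>
      conv_lhs => rw [Pcount]
      simp [ih]

theorem Pcount_left_zero (j k : Nat) : Pcount 0 j k = if k = 0 then 1 else 0 := by
  cases j <;> simp [Pcount]

theorem Pcount_M1 (i k : Nat) : Pcount i 1 k = if k ≤ i then 1 else 0 := by
  induction i generalizing k with
  | zero => simp [Pcount]
  | succ i ih =>
    show Pcount (i+1) (0+1) k = _
    rw [Pcount]
    rcases Nat.eq_zero_or_pos k with hk | hk
    · subst hk; simp [Pcount]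
    · have hk' : k ≠ 0 := by omega
      have h0 : Pcount (i+1) 0 k = 0 := by simp [Pcount, hk']
      have h1 : (0:Nat)+1 ≤ k := by omega
      rw [h0, if_pos h1, ih (k-(0+1))]
      by_cases h2 : k ≤ i+1
      · have h3 : k - (0+1) ≤ i := by omega
        simp [h2, h3]
      · have h3 : ¬ (k - (0+1) ≤ i) := by omega
        simp [h2, h3]

theorem Pcount_N1 (j k : Nat) : Pcount 1 j k = if k ≤ j then 1 else 0 := by
  induction j generalizing k with
  | zero => simp [Pcount]
  | succ j ih =>
    conv_lhs => rw [Pcount]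
    rw [ih k]
    by_cases h : k ≤ j
    · have h2 : k ≤ j+1 := by omega
      have h3 : ¬ (j+1 ≤ k) := by omega
      simp [h, h2, h3]
    · by_cases h2 : k = j+1
      · subst h2
        simp [h, Pcount_left_zero]
      · have h3 : ¬ (k ≤ j+1) := by omega
        by_cases h4 : j+1 ≤ k
        · have hk0 : ¬ (k - (j+1) = 0) := by omega
          simp [h, h3, h4, Pcount_left_zero, hk0]
        · simp [h, h3, h4]

theorem Pcount_succ_left : ∀ (i j k : Nat), k ≤ i → Pcount (i+1) j k = Pcount i j k := by
  intro i
  induction i with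
  | zero =>
    intro j k h
    have hk : k = 0 := by omega
    subst hk
    simp [Pcount_zero_sum]
  | succ i ih =>
    intro j k h
    induction j with
    | zero => simp [Pcount]
    | succ j ihj =>
      conv_lhs => rw [Pcount]
      conv_rhs => rw [Pcount]
      rw [ihj]
      congr 1
      split_ifs with hjk
      · exact ih (j+1) (k-(j+1)) (by omega)
      · rfl

theorem Pcount_succ_right (i j k : Nat) (h : k ≤ j) : Pcount i (j+1) k = Pcount i j k := by
  cases i with
  | zero => simp [Pcount_left_zero]
  | succ i =>
    conv_lhs => rw [Pcount]
    have h2 : ¬ (j+1 ≤ k) := by omega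
    simp [h2]

-- ===== A-side lemmas =====

theorem go_neg (f : Nat) (N M n : Int) (h : n < 0) : intpartlimGo f N M n = 0 := by
  cases f with
  | zero => rfl
  | succ f => simp [intpartlimGo, h]

theorem go_zero (f : Nat) (N M : Int) (hf : 1 ≤ f) : intpartlimGo f N M 0 = 1 := by
  cases f with
  | zero => omega
  | succ f => simp [intpartlimGo]

theorem go_M1_zero (f : Nat) (N n : Int) (hf : 1 ≤ f) (hn : 1 ≤ n) (hN : N < n) :
    intpartlimGo f N 1 n = 0 := by
  cases f with
  | zero => omega
  | succ f =>
    simp [intpartlimGo, show ¬ n < 0 by omega, show ¬ n = 0 by omega, show ¬ n ≤ N by omega]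

theorem go_nonneg : ∀ (f : Nat) (N M n : Int), 0 ≤ intpartlimGo f N M n := by
  intro f
  induction f with
  | zero => intro N M n; simp [intpartlimGo]
  | succ f ih =>
    intro N M n
    simp only [intpartlimGo]
    split_ifs
    all_goals first | exact add_nonneg (ih _ _ _) (ih _ _ _) | norm_num

theorem go_eq_P : ∀ (f : Nat) (N M n : Int), 1 ≤ N → 1 ≤ M → 0 ≤ n →
    M.toNat + n.toNat < f →
    intpartlimGo f N M n = (Pcount N.toNat M.toNat n.toNat : Int) := by
  intro f
  induction f with
  | zero => intro N M n _ _ _ hf; omega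
  | succ f ih =>
    intro N M n hN hM hn hf
    simp only [intpartlimGo]
    rw [if_neg (by omega : ¬ n < 0)]
    by_cases h0 : n = 0
    · subst h0
      rw [if_pos rfl]
      simp [Pcount_zero_sum]
    · rw [if_neg h0]
      by_cases hM1 : M = 1
      · subst hM1
        rw [if_pos rfl]
        rw [show ((1:Int)).toNat = 1 from rfl, Pcount_M1]
        by_cases hc : n ≤ N
        · rw [if_pos hc, if_pos (by omega)]
          norm_num
        · rw [if_neg hc, if_neg (by omega)]
          rfl
      · rw [if_neg hM1]
        by_cases hN1 : N = 1
        · subst hN1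
          rw [if_pos rfl]
          rw [show ((1:Int)).toNat = 1 from rfl, Pcount_N1]
          by_cases hc : n ≤ M
          · rw [if_pos hc, if_pos (by omega)]
            norm_num
          · rw [if_neg hc, if_neg (by omega)]
            rfl
        · rw [if_neg hN1]
          have hN2 : 2 ≤ N := by omega
          have hM2 : 2 ≤ M := by omega
          obtain ⟨i, hi⟩ : ∃ i, N.toNat = i + 2 := ⟨N.toNat - 2, by omega⟩
          obtain ⟨j, hj⟩ : ∃ j, M.toNat = j + 2 := ⟨M.toNat - 2, by omega⟩
          rw [ih N (M-1) n hN (by omega) hn (by omega)]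
          have e1 : (M-1).toNat = j + 1 := by omega
          rw [e1, hi, hj]
          conv_rhs => rw [show (i+2) = (i+1)+1 from rfl, show (j+2) = (j+1)+1 from rfl, Pcount]
          by_cases hnm : n - M < 0
          · rw [go_neg f _ _ _ hnm]
            rw [if_neg (by omega : ¬ (j+1)+1 ≤ n.toNat)]
            push_cast
            ring
          · rw [ih (N-1) M (n-M) (by omega) (by omega) (by omega) (by omega)]
            have e2 : (N-1).toNat = i + 1 := by omega
            have e3 : (n-M).toNat = n.toNat - ((j+1)+1) := by omega
            rw [e2, e3, hj]
            rw [if_pos (by omega : (j+1)+1 ≤ n.toNat)]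
            push_cast
            ring

-- A with N ≤ 0, n = 1: zero
theorem go_zero_n1 : ∀ (f : Nat) (N M : Int), N ≤ 0 → 1 ≤ M →
    M.toNat + 1 < f → intpartlimGo f N M 1 = 0 := by
  intro f
  induction f with
  | zero => intro N M _ _ hf; omega
  | succ f ih =>
    intro N M hN hM hf
    simp only [intpartlimGo]
    rw [if_neg (by omega : ¬ (1:Int) < 0), if_neg (by omega : ¬ (1:Int) = 0)]
    by_cases hM1 : M = 1
    · rw [if_pos hM1, if_neg (by omega : ¬ (1:Int) ≤ N)]
    · rw [if_neg hM1, if_neg (by omega : ¬ N = 1)]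
      rw [ih N (M-1) hN (by omega) (by omega)]
      rw [go_neg f _ _ _ (by omega : (1:Int) - M < 0)]
      norm_num

-- A with N ≤ 0, M = 2, n odd: zero
theorem go_zero_odd : ∀ (f : Nat) (N n : Int), N ≤ 0 → 1 ≤ n → n % 2 = 1 →
    2 + n.toNat < f → intpartlimGo f N 2 n = 0 := by
  intro f
  induction f with
  | zero => intro N n _ _ _ hf; omega
  | succ f ih =>
    intro N n hN hn hodd hf
    simp only [intpartlimGo]
    rw [if_neg (by omega : ¬ n < 0), if_neg (by omega : ¬ n = 0),
        if_neg (by omega : ¬ (2:Int) = 1), if_neg (by omega : ¬ N = 1)]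
    rw [show (2:Int) - 1 = 1 by norm_num, go_M1_zero f N n (by omega) hn (by omega)]
    by_cases h1 : n = 1
    · rw [go_neg f _ _ _ (by omega : n - 2 < 0)]
      norm_num
    · rw [ih (N-1) (n-2) (by omega) (by omega) (by omega) (by omega)]
      norm_num

-- A with N ≤ 0 inside D_: at least 1
theorem go_pos : ∀ (f : Nat) (N M n : Int), N ≤ 0 → 2 ≤ M → 2 ≤ n →
    (3 ≤ M ∨ n % 2 = 0) → M.toNat + n.toNat < f → 1 ≤ intpartlimGo f N M n := by
  intro f
  induction f with
  | zero => intro N M n _ _ _ _ hf; omega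
  | succ f ih =>
    intro N M n hN hM hn hD hf
    simp only [intpartlimGo]
    rw [if_neg (by omega : ¬ n < 0), if_neg (by omega : ¬ n = 0),
        if_neg (by omega : ¬ M = 1), if_neg (by omega : ¬ N = 1)]
    by_cases hM2 : M = 2
    · have heven : n % 2 = 0 := by omega
      subst hM2
      by_cases h2 : n = 2
      · have : intpartlimGo f (N-1) 2 (n-2) = 1 := by
          rw [show n - 2 = 0 by omega]
          exact go_zero f _ _ (by omega)
        rw [this]
        have := go_nonneg f N (2-1) n
        omega
      · have : 1 ≤ intpartlimGo f (N-1) 2 (n-2) :=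
          ih (N-1) 2 (n-2) (by omega) (by omega) (by omega) (by omega) (by omega)
        have := go_nonneg f N (2-1) n
        omega
    · have hM3 : 3 ≤ M := by omega
      by_cases hB : M = 3 ∧ n % 2 = 1
      · obtain ⟨hM3', hodd⟩ := hB
        subst hM3'
        by_cases h3 : n = 3
        · have : intpartlimGo f (N-1) 3 (n-3) = 1 := by
            rw [show n - 3 = 0 by omega]
            exact go_zero f _ _ (by omega)
          rw [this]
          have := go_nonneg f N (3-1) n
          omega
        · have : 1 ≤ intpartlimGo f (N-1) 3 (n-3) :=
            ih (N-1) 3 (n-3) (by omega) (by omega) (by omega) (by omega) (by omega)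
          have := go_nonneg f N (3-1) n
          omega
      · have : 1 ≤ intpartlimGo f N (M-1) n := by
          apply ih N (M-1) n hN (by omega) hn _ (by omega)
          by_cases h4 : 4 ≤ M
          · left; omega
          · right; omega
        have := go_nonneg f (N-1) M (n-M)
        omega

-- ===== B-side lemmas =====

def Prow (j n : Nat) (i : Nat) : List Int :=
  (List.range (n+1)).map (fun k => (Pcount i j k : Int))

theorem Pcount_right_zero (i k : Nat) : Pcount i 0 k = if k = 0 then 1 else 0 := by
  cases i <;> simp [Pcount]

theorem Prow_getD (j n i k : Nat) (hk : k ≤ n) : (Prow j n i).getD k 0 = (Pcount i j k : Int) := by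
  exact PySem.List.getD_map_range _ _ _ _ (by omega)

theorem Prow_base (j n i : Nat) (h : i = 0 ∨ j = 0) : Prow j n i = 1 :: List.replicate n 0 := by
  have hk : ∀ k, Pcount i j k = if k = 0 then 1 else 0 := by
    rcases h with h | h <;> subst h <;> intro k
    · exact Pcount_left_zero j k
    · exact Pcount_right_zero i k
  unfold Prow
  rw [List.range_succ_eq_map, List.map_cons, List.map_map]
  rw [hk 0]
  norm_num
  simp only [Function.comp_def]
  have : ∀ x ∈ List.range n, ((Pcount i j (Nat.succ x) : Int)) = (fun _ => (0:Int)) x := by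
    intro x _
    rw [hk (Nat.succ x)]
    simp
  rw [List.map_congr_left this, List.map_const', List.length_range]

theorem inner_fold (nn a s : Nat) :
    ∀ t, t ≤ a →
    (PySem.List.pyRange 1 ((t:Int)+1) 1).foldl
      (fun new_rows i =>
        new_rows ++ [(List.range (nn+1)).map (fun k =>
          (PySem.List.pyGetD ((List.range (a+1)).map (fun i' => Prow s nn i')) i []).getD k 0 +
            (if ((s:Int)+1) ≤ (k : Int) then
              (PySem.List.pyGetD new_rows (i-1) []).getD (k - ((s:Int)+1).toNat) 0 else 0))])
      [PySem.List.pyGetD ((List.range (a+1)).map (fun i' => Prow s nn i')) 0 []]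
    = (List.range (t+1)).map (fun i => Prow (s+1) nn i) := by
  intro t
  induction t with
  | zero =>
    intro _
    rw [PySem.List.pyRange_one_eq_nil (by norm_num)]
    simp only [List.foldl_nil]
    rw [PySem.List.pyGetD_zero, PySem.List.getD_map_range _ _ _ _ (by omega)]
    rw [show List.range (0+1) = [0] from rfl, List.map_singleton]
    rw [Prow_base s nn 0 (Or.inl rfl), Prow_base (s+1) nn 0 (Or.inl rfl)]
  | succ t ih =>
    intro ht
    have e0 : ((t+1 : Nat) : Int) + 1 = (((t : Nat) : Int) + 1) + 1 := by push_cast; ring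
    rw [e0, PySem.List.pyRange_one_succ_right (by omega : (1:Int) ≤ (t:Int)+1), List.foldl_append,
        ih (by omega), List.foldl_cons, List.foldl_nil]
    show (List.range (t+1)).map (fun i => Prow (s+1) nn i) ++ [_] = _
    have eidx : ((t : Int) + 1) - 1 = ((t : Nat) : Int) := by ring
    rw [eidx, PySem.List.pyGetD_natCast, PySem.List.getD_map_range _ _ _ _ (by omega)]
    have eidx2 : ((t : Int) + 1) = (((t+1 : Nat)) : Int) := by push_cast; ring
    rw [eidx2, PySem.List.pyGetD_natCast, PySem.List.getD_map_range _ _ _ _ (by omega)]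
    have erow : (List.range (nn+1)).map (fun k =>
        (Prow s nn (t+1)).getD k 0 + (if ((s:Int)+1) ≤ (k : Int) then (Prow (s+1) nn t).getD (k - ((s:Int)+1).toNat) 0 else 0))
        = Prow (s+1) nn (t+1) := by
      apply List.map_congr_left
      intro k hk
      have hk' : k ≤ nn := by
        have := List.mem_range.mp hk
        omega
      rw [Prow_getD s nn (t+1) k hk']
      rw [show ((s:Int)+1).toNat = s + 1 by omega]
      show _ = (Pcount (t+1) (s+1) k : Int)
      rw [Pcount]
      by_cases hc : s+1 ≤ k
      · rw [if_pos (by exact_mod_cast hc), if_pos hc,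
            Prow_getD (s+1) nn t (k - (s+1)) (by omega)]
        push_cast
        ring
      · rw [if_neg (by exact_mod_cast hc), if_neg hc]
        push_cast
        ring
    rw [erow, show ([Prow (s+1) nn (t+1)] : List (List Int))
          = (List.map (fun i => Prow (s+1) nn i) [t+1]) from rfl,
        ← List.map_append, ← List.range_succ]

theorem outer_fold (nn a : Nat) :
    ∀ s : Nat,
    (PySem.List.pyRange 1 ((s:Int)+1) 1).foldl
      (fun rows j =>
        (PySem.List.pyRange 1 ((a:Int)+1) 1).foldl
          (fun new_rows i =>
            new_rows ++ [(List.range (nn+1)).map (fun k =>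
              (PySem.List.pyGetD rows i []).getD k 0 +
                (if j ≤ (k : Int) then (PySem.List.pyGetD new_rows (i-1) []).getD (k - j.toNat) 0 else 0))])
          [PySem.List.pyGetD rows 0 []])
      ((List.range (a+1)).map (fun _ => 1 :: List.replicate nn 0))
    = (List.range (a+1)).map (fun i => Prow s nn i) := by
  intro s
  induction s with
  | zero =>
    rw [show PySem.List.pyRange 1 (((0:Nat):Int)+1) = [] from
        PySem.List.pyRange_one_eq_nil (by norm_num)]
    simp only [List.foldl_nil]
    apply List.map_congr_left
    intro i _
    exact (Prow_base 0 nn i (Or.inr rfl)).symm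
  | succ s ih =>
    have e0 : ((s+1 : Nat) : Int) + 1 = (((s : Nat) : Int) + 1) + 1 := by push_cast; ring
    rw [e0, show PySem.List.pyRange 1 (((s:Nat):Int)+1+1)
          = PySem.List.pyRange 1 (((s:Nat):Int)+1) ++ [((s:Nat):Int)+1]
        from PySem.List.pyRange_one_succ_right (by omega),
        List.foldl_append, ih, List.foldl_cons, List.foldl_nil]
    exact inner_fold nn a s a (le_refl a)

theorem alt_eq_P (N M n : Int) (hn : 1 ≤ n) (ha : 1 ≤ min N n) (hb : 1 ≤ min M n) :
    intpartlim_alt N M n = (Pcount (min N n).toNat (min M n).toNat n.toNat : Int) := by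
  have ea : min N n = (((min N n).toNat : Nat) : Int) := by omega
  have eb : min M n = (((min M n).toNat : Nat) : Int) := by omega
  simp only [intpartlim_alt]
  rw [if_neg (by omega : ¬ n < 0), if_neg (by omega : ¬ n = 0),
      if_neg (by omega : ¬ (min N n ≤ 0 ∨ min M n ≤ 0))]
  conv_lhs => rw [ea, eb]
  simp only [Int.toNat_natCast]
  rw [outer_fold n.toNat (min N n).toNat (min M n).toNat]
  rw [PySem.List.getD_map_range _ _ _ _ (by omega),
      Prow_getD _ _ _ _ (le_refl _)]

theorem alt_zero (N M n : Int) (hn : 1 ≤ n) (h : min N n ≤ 0 ∨ min M n ≤ 0) :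
    intpartlim_alt N M n = 0 := by
  simp only [intpartlim_alt]
  rw [if_neg (by omega : ¬ n < 0), if_neg (by omega : ¬ n = 0), if_pos h]

theorem Pcount_clamp_min (i j k : Nat) : Pcount i j k = Pcount (min i k) (min j k) k := by
  have l : ∀ i j k : Nat, k ≤ i → Pcount i j k = Pcount k j k := by
    intro i j k h
    obtain ⟨d, rfl⟩ : ∃ d, i = k + d := ⟨i - k, by omega⟩
    clear h
    induction d with
    | zero => rfl
    | succ d ih =>
      rw [show k + (d+1) = (k+d) + 1 by omega, Pcount_succ_left _ _ _ (by omega), ih]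
  have r : ∀ i j k : Nat, k ≤ j → Pcount i j k = Pcount i k k := by
    intro i j k h
    obtain ⟨d, rfl⟩ : ∃ d, j = k + d := ⟨j - k, by omega⟩
    clear h
    induction d with
    | zero => rfl
    | succ d ih =>
      rw [show k + (d+1) = (k+d) + 1 by omega, Pcount_succ_right _ _ _ (by omega), ih]
  rcases le_total i k with hi | hi <;> rcases le_total j k with hj | hj
  · rw [min_eq_left hi, min_eq_left hj]
  · rw [min_eq_left hi, min_eq_right hj, r i j k hj]
  · rw [min_eq_right hi, min_eq_left hj, l i j k hi]
  · rw [min_eq_right hi, min_eq_right hj, l i j k hi, r k j k hj]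

-- ===== VERDICT (by name: the statement is the Claim_ definition above) =====
theorem go_step (N M n : Int) (hn : 1 ≤ n) (hM : ¬ M = 1) (hN : N = 1) (hnM : ¬ n ≤ M) :
    ∀ f, 1 ≤ f → intpartlimGo f N M n = 0 := by
  intro f hf
  cases f with
  | zero => omega
  | succ f =>
    simp only [intpartlimGo]
    rw [if_neg (by omega : ¬ n < 0), if_neg (by omega : ¬ n = 0), if_neg hM,
        if_pos hN, if_neg hnM]

theorem intpartlim_spec : Claim_unchanged_intpartlim := by
  intro N M n _ hPre hD
  by_cases hneg : n < 0
  · rw [show intpartlim N M n = 0 from go_neg _ _ _ _ hneg]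
    simp [intpartlim_alt, hneg]
  · by_cases h0 : n = 0
    · subst h0
      rw [show intpartlim N M 0 = 1 from go_zero _ _ _ (by omega)]
      simp [intpartlim_alt]
    · have hn : 1 ≤ n := by omega
      by_cases hN1 : 1 ≤ N
      · by_cases hM1 : 1 ≤ M
        · -- main case: both bounds positive
          rw [show intpartlim N M n = (Pcount N.toNat M.toNat n.toNat : Int) from
              go_eq_P _ N M n hN1 hM1 (by omega) (by omega)]
          rw [alt_eq_P N M n hn (by omega) (by omega)]
          have e1 : (min N n).toNat = min N.toNat n.toNat := by omega
          have e2 : (min M n).toNat = min M.toNat n.toNat := by omega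
          rw [e1, e2, ← Pcount_clamp_min]
        · -- N ≥ 1, M ≤ 0: Pre forces N = 1, A hits its N==1 base and returns 0
          have hN : N = 1 := by
            rcases hPre with h | h | h <;> omega
          rw [alt_zero N M n hn (Or.inr (by omega))]
          simp only [intpartlim]
          exact go_step N M n hn (by omega) hN (by omega) _ (by omega)
      · -- N ≤ 0 and ¬ D_: A returns 0 and so does B
        have hM1 : 1 ≤ M := by rcases hPre with h | h | h <;> omega
        have hB : intpartlim_alt N M n = 0 := alt_zero N M n hn (Or.inl (by omega))
        rw [hB]
        simp only [intpartlim]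
        unfold D_intpartlim at hD
        push Not at hD
        by_cases hM2 : 2 ≤ M
        · by_cases hn2 : 2 ≤ n
          · -- then M = 2 and n odd
            have := hD (by omega) hM2 hn2
            have hModd : M = 2 ∧ n % 2 = 1 := by omega
            obtain ⟨hM, hodd⟩ := hModd
            subst hM
            exact go_zero_odd _ N n (by omega) hn hodd (by omega)
          · -- n = 1
            have h1 : n = 1 := by omega
            subst h1
            exact go_zero_n1 _ N M (by omega) hM1 (by omega)
        · -- M = 1: A's M==1 base gives 0
          have hM : M = 1 := by omega
          subst hM
          exact go_M1_zero _ N n (by omega) hn (by omega)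

theorem intpartlim_changed : Claim_changed_intpartlim := by
  unfold Claim_changed_intpartlim; decide

theorem intpartlim_tight : Claim_exact_intpartlim := by
  intro N M n _ _ hD
  obtain ⟨hN, hM, hn, hcond⟩ := hD
  have h1 : 1 ≤ intpartlim N M n :=
    go_pos _ N M n hN hM hn hcond (by omega)
  have h2 : intpartlim_alt N M n = 0 :=
    alt_zero N M n (by omega) (Or.inl (by omega))
  omega
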